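-- pv_equiv track=rewrite | github.com/doncat99/FinanceCenter | findy/vendor/baostock/util/stringutil.py | add_zero_for_string
-- ===== SOURCE A (Python) =====
-- def add_zero_for_string(content, length, direction):
--     """在str的左或右添加0
--     :param str:待修改的字符串
--     :param length:总共的长度
--     :param direction:方向，True左，False右
--     :return:
--     """
--     content = str(content)
--     str_len = len(content)
--     if str_len < length:
--         while str_len < length:
--             if direction:
--                 content = "0" + content
--             else:
--                 content = content + "0"
--
--             str_len = len(content)
--     return content
-- ===== SOURCE B (Python) =====
-- def add_zero_for_string(content, length, direction):
--     content = str(content)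
--     pad = "0" * max(0, length - len(content))
--     return pad + content if direction else content + pad
-- ===== Notes on version B (the rewrite author's own statement) =====
-- stated objective: simpler
-- what changed: Replaces A's per-character while loop (one string concatenation per added zero) with a closed-form computation of the deficit and a single string multiplication plus one concatenation.
import Mathlib
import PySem

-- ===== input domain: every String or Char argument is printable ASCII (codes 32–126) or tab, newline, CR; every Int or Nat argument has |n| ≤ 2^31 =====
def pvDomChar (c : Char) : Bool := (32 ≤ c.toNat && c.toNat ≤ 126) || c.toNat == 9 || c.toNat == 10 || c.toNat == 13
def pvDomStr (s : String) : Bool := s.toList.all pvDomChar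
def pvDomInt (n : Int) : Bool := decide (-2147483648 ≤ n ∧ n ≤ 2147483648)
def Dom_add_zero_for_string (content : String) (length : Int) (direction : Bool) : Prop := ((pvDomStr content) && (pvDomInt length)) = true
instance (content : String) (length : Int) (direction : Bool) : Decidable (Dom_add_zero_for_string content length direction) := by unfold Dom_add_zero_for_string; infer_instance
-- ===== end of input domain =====

-- B replaces A's per-character concatenation loop by a closed-form pad (deficit count + replicate); objective: simpler.
-- ===== PORT A =====
-- the while loop: while str_len < length, prepend/append "0"
def pvALoop (cs : List Char) (length : Int) (direction : Bool) : List Char :=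
  if (cs.length : Int) < length then
    pvALoop (if direction then '0' :: cs else cs ++ ['0']) length direction
  else cs
termination_by (length - cs.length).toNat
decreasing_by
  split <;> simp_all <;> omega

def add_zero_for_string (content : String) (length : Int) (direction : Bool) : String :=
  String.mk (pvALoop content.toList length direction)

-- ===== PORT B =====
def add_zero_for_string_alt (content : String) (length : Int) (direction : Bool) : String :=
  let cs := content.toList
  let pad := List.replicate (max 0 (length - cs.length)).toNat '0'
  String.mk (if direction then pad ++ cs else cs ++ pad)

-- ===== PRECONDITION & SPEC =====
def Spec_add_zero_for_string (content : String) (length : Int) (direction : Bool) (out : String) : Prop := out = add_zero_for_string_alt content length direction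
instance (content : String) (length : Int) (direction : Bool) (out : String) : Decidable (Spec_add_zero_for_string content length direction out) := by unfold Spec_add_zero_for_string; infer_instance

-- ===== CLAIM (what is proved, stated in full; the proofs are below) =====
def Claim_equal_add_zero_for_string : Prop := ∀ (content : String) (length : Int) (direction : Bool), Dom_add_zero_for_string content length direction → Spec_add_zero_for_string content length direction (add_zero_for_string content length direction)

-- ===== LEMMAS AND PROOFS =====

-- ===== VERDICT (by name: the statement is the Claim_ definition above) =====
theorem pvALoop_closed (n : Nat) : ∀ (cs : List Char) (length : Int) (direction : Bool),
    (length - cs.length).toNat = n →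
    pvALoop cs length direction =
      (if direction then List.replicate n '0' ++ cs else cs ++ List.replicate n '0') := by
  induction n with
  | zero =>
    intro cs length direction h
    rw [pvALoop]
    have : ¬ (cs.length : Int) < length := by omega
    simp [this]
  | succ k ih =>
    intro cs length direction h
    rw [pvALoop]
    have hlt : (cs.length : Int) < length := by omega
    simp only [hlt, if_true]
    cases direction with
    | true =>
      have := ih ('0' :: cs) length true (by simp; omega)
      simp only [if_true] at this ⊢
      rw [this, List.replicate_succ']
      simp
    | false =>
      have := ih (cs ++ ['0']) length false (by simp; omega)
      simp only [Bool.false_eq_true, if_false] at this ⊢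
      rw [this, List.replicate_succ, List.append_assoc]
      simp

theorem add_zero_for_string_spec : Claim_equal_add_zero_for_string := by
  intro content length direction _
  unfold Spec_add_zero_for_string add_zero_for_string add_zero_for_string_alt
  rw [pvALoop_closed ((length - content.toList.length).toNat) content.toList length direction rfl]
  congr 1
  cases direction <;> simp <;> omega
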